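-- pv_equiv track=rewrite | github.com/vkumar51/incident-message-analyzer | batch_analyzer.py | _categorize_messages
-- ===== SOURCE A (Python) =====
-- from typing import List, Dict, Any, Optional
--
-- def _categorize_messages(significant_messages: List[Dict]) -> Dict[str, int]:
--     """Categorize significant messages by type"""
--     categories = {
--         'diagnostics': 0,
--         'actions': 0,
--         'impact': 0,
--         'resolution': 0
--     }
--
--     for msg in significant_messages:
--         category = msg.get('category')
--         if category in categories:
--             categories[category] += 1
--
--     return categories
-- ===== SOURCE B (Python) =====
-- from typing import List, Dict
--
-- def _categorize_messages(significant_messages: List[Dict]) -> Dict[str, int]: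
--     """Categorize significant messages by type: one independent scan per fixed category."""
--     return {k: sum(1 for m in significant_messages if m.get('category') == k)
--             for k in ('diagnostics', 'actions', 'impact', 'resolution')}
-- ===== Notes on version B (the rewrite author's own statement) =====
-- stated objective: alternative
-- what changed: Replaces the single pass with a shared mutable dict and in-loop membership test by four independent per-key scans, each summing equality matches for one fixed category (count-per-key decomposition, no shared accumulator).
import Mathlib
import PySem

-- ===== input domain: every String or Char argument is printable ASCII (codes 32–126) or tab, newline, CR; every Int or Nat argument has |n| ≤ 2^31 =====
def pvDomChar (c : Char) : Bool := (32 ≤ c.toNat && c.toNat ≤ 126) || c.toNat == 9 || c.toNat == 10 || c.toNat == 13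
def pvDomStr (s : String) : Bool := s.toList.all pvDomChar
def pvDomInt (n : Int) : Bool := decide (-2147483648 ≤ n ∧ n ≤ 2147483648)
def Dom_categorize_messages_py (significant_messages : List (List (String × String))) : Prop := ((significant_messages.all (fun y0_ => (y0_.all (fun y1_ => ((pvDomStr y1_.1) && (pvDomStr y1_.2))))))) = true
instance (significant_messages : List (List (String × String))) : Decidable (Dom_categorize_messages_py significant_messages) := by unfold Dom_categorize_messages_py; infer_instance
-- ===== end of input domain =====

-- B replaces A's single-pass shared-dict loop with four independent per-key scans,
-- each summing equality matches for one fixed category (alternative decomposition).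


-- ===== PORT A =====
def categorize_messages_py (significant_messages : List (List (String × String))) : List (String × Int) :=
  let categories : PySem.Dict String Int :=
    PySem.Dict.mk [("diagnostics", 0), ("actions", 0), ("impact", 0), ("resolution", 0)]
  let categories := significant_messages.foldl (fun cats msg =>
    let category := PySem.Dict.get? (PySem.Dict.mk msg) "category"
    match category with
    | some c => if cats.contains c then cats.modify c 0 (· + 1) else cats
    | none => cats) categories
  categories.items

-- ===== PORT B =====
-- sum(1 for m in significant_messages if m.get('category') == k)
def pvKeyCount (significant_messages : List (List (String × String))) (k : String) : Int :=
  significant_messages.foldl (fun acc m =>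
    if PySem.Dict.get? (PySem.Dict.mk m) "category" = some k then acc + 1 else acc) 0

def categorize_messages_py_alt (significant_messages : List (List (String × String))) : List (String × Int) :=
  ["diagnostics", "actions", "impact", "resolution"].map (fun k => (k, pvKeyCount significant_messages k))

-- ===== PRECONDITION & SPEC =====
def Spec_categorize_messages_py (significant_messages : List (List (String × String))) (out : List (String × Int)) : Prop := out = categorize_messages_py_alt significant_messages
instance (significant_messages : List (List (String × String))) (out : List (String × Int)) : Decidable (Spec_categorize_messages_py significant_messages out) := by unfold Spec_categorize_messages_py; infer_instance

-- ===== CLAIM (what is proved, stated in full; the proofs are below) =====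
def Claim_equal_categorize_messages_py : Prop := ∀ (significant_messages : List (List (String × String))), Dom_categorize_messages_py significant_messages → Spec_categorize_messages_py significant_messages (categorize_messages_py significant_messages)

-- ===== LEMMAS AND PROOFS =====

-- A's loop body, named for the induction.
def pvStepA (cats : PySem.Dict String Int) (msg : List (String × String)) : PySem.Dict String Int :=
  match PySem.Dict.get? (PySem.Dict.mk msg) "category" with
  | some c => if cats.contains c then cats.modify c 0 (· + 1) else cats
  | none => cats

-- the category of one message
def pvCat (msg : List (String × String)) : Option String := PySem.Dict.get? (PySem.Dict.mk msg) "category"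

-- Invariant: folding A's step over msgs from the 4-key dict with values a b c d adds the
-- respective occurrence counts of each key among the messages' categories.
theorem pvLoopA (msgs : List (List (String × String))) (a b c d : Int) :
    (msgs.foldl pvStepA (PySem.Dict.mk [("diagnostics", a), ("actions", b), ("impact", c), ("resolution", d)])) =
    PySem.Dict.mk [("diagnostics", a + (msgs.map pvCat).count (some "diagnostics")),
                   ("actions", b + (msgs.map pvCat).count (some "actions")),
                   ("impact", c + (msgs.map pvCat).count (some "impact")),
                   ("resolution", d + (msgs.map pvCat).count (some "resolution"))] := by
  induction msgs generalizing a b c d with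
  | nil => simp [List.count]
  | cons m rest ih =>
    simp only [List.foldl_cons, List.map_cons]
    rcases hm : pvCat m with _ | cstr
    · unfold pvCat at hm
      have hs : pvStepA (PySem.Dict.mk [("diagnostics", a), ("actions", b), ("impact", c), ("resolution", d)]) m
          = PySem.Dict.mk [("diagnostics", a), ("actions", b), ("impact", c), ("resolution", d)] := by
        unfold pvStepA; rw [hm]
      rw [hs, ih]
      simp
    · unfold pvCat at hm
      by_cases h1 : cstr = "diagnostics"
      · subst h1
        have hs : pvStepA (PySem.Dict.mk [("diagnostics", a), ("actions", b), ("impact", c), ("resolution", d)]) m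
            = PySem.Dict.mk [("diagnostics", a + 1), ("actions", b), ("impact", c), ("resolution", d)] := by
          unfold pvStepA; rw [hm]
          simp [PySem.Dict.contains, PySem.Dict.modify, PySem.Dict.insert, PySem.Dict.get?, PySem.Dict.getD]
        rw [hs, ih]
        simp only [List.count_cons, PySem.Dict.mk.injEq, List.cons.injEq, Prod.mk.injEq]
        simp
        omega
      · by_cases h2 : cstr = "actions"
        · subst h2
          have hs : pvStepA (PySem.Dict.mk [("diagnostics", a), ("actions", b), ("impact", c), ("resolution", d)]) m
              = PySem.Dict.mk [("diagnostics", a), ("actions", b + 1), ("impact", c), ("resolution", d)] := by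
            unfold pvStepA; rw [hm]
            simp [PySem.Dict.contains, PySem.Dict.modify, PySem.Dict.insert, PySem.Dict.get?, PySem.Dict.getD]
          rw [hs, ih]
          simp only [List.count_cons, PySem.Dict.mk.injEq, List.cons.injEq, Prod.mk.injEq]
          simp
          omega
        · by_cases h3 : cstr = "impact"
          · subst h3
            have hs : pvStepA (PySem.Dict.mk [("diagnostics", a), ("actions", b), ("impact", c), ("resolution", d)]) m
                = PySem.Dict.mk [("diagnostics", a), ("actions", b), ("impact", c + 1), ("resolution", d)] := by
              unfold pvStepA; rw [hm]
              simp [PySem.Dict.contains, PySem.Dict.modify, PySem.Dict.insert, PySem.Dict.get?, PySem.Dict.getD]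
            rw [hs, ih]
            simp only [List.count_cons, PySem.Dict.mk.injEq, List.cons.injEq, Prod.mk.injEq]
            simp
            omega
          · by_cases h4 : cstr = "resolution"
            · subst h4
              have hs : pvStepA (PySem.Dict.mk [("diagnostics", a), ("actions", b), ("impact", c), ("resolution", d)]) m
                  = PySem.Dict.mk [("diagnostics", a), ("actions", b), ("impact", c), ("resolution", d + 1)] := by
                unfold pvStepA; rw [hm]
                simp [PySem.Dict.contains, PySem.Dict.modify, PySem.Dict.insert, PySem.Dict.get?, PySem.Dict.getD]
              rw [hs, ih]
              simp only [List.count_cons, PySem.Dict.mk.injEq, List.cons.injEq, Prod.mk.injEq]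
              simp
              omega
            · have hs : pvStepA (PySem.Dict.mk [("diagnostics", a), ("actions", b), ("impact", c), ("resolution", d)]) m
                  = PySem.Dict.mk [("diagnostics", a), ("actions", b), ("impact", c), ("resolution", d)] := by
                unfold pvStepA; rw [hm]
                simp [PySem.Dict.contains, h1, h2, h3, h4, Ne.symm]
              rw [hs, ih]
              simp [h1, h2, h3, h4]

-- B's per-key scan computes the occurrence count of (some k) among the categories.
theorem pvKeyCount_eq (msgs : List (List (String × String))) (k : String) :
    pvKeyCount msgs k = ((msgs.map pvCat).count (some k) : Int) := by
  have h : ∀ (acc : Int), msgs.foldl (fun acc m =>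
      if PySem.Dict.get? (PySem.Dict.mk m) "category" = some k then acc + 1 else acc) acc
      = acc + ((msgs.map pvCat).count (some k) : Int) := by
    induction msgs with
    | nil => intro acc; simp [List.count]
    | cons m rest ih =>
      intro acc
      simp only [List.foldl_cons, List.map_cons, List.count_cons, pvCat]
      by_cases hm : PySem.Dict.get? (PySem.Dict.mk m) "category" = some k
      · simp [hm, ih]; ring
      · have hne : ¬ (some k = PySem.Dict.get? (PySem.Dict.mk m) "category") := fun h' => hm h'.symm
        simp [hm, ih, hne]
  simpa using h 0

-- ===== VERDICT (by name: the statement is the Claim_ definition above) =====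
theorem categorize_messages_py_spec : Claim_equal_categorize_messages_py := by
  intro sm _
  unfold Spec_categorize_messages_py
  have hA : categorize_messages_py sm = (sm.foldl pvStepA
      (PySem.Dict.mk [("diagnostics", (0:Int)), ("actions", 0), ("impact", 0), ("resolution", 0)])).items := rfl
  rw [hA, pvLoopA]
  unfold categorize_messages_py_alt
  simp [pvKeyCount_eq]
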